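-- pv_equiv track=rewrite | github.com/XiaoCaoAskedForHelp/LeetCode-Py | 周赛/周赛392/Solution100244带权图里旅途的最小代价.py | minimumCost1
-- ===== SOURCE A (Python) =====
-- from typing import List
--
-- def minimumCost1(n: int, edges: List[List[int]], query: List[List[int]]) -> List[int]:
--     fa = [i for i in range(n)]
--     and_ = [-1] * n
--
--     def find(x: int):
--         if fa[x] != x:
--             fa[x] = find(fa[x])
--         return fa[x]
--
--     for x, y, w in edges:
--         x = find(x)
--         y = find(y)
--         and_[y] &= w
--         if x != y:  # 如果x,y的父亲节点不一样，设置x的父亲节点为y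
--             and_[y] &= and_[x]
--             fa[x] = y
--     return [0 if s == t else -1 if find(s) != find(t) else and_[find(s)] for s, t in query]
-- ===== SOURCE B (Python) =====
-- from typing import List
--
-- def minimumCost1(n: int, edges: List[List[int]], query: List[List[int]]) -> List[int]:
--     comp = list(range(n))
--     cand = {}
--     for x, y, w in edges:
--         cx, cy = comp[x], comp[y]
--         cand[cy] = cand.get(cy, -1) & w
--         if cx != cy:
--             cand[cy] &= cand.get(cx, -1)
--             comp = [cy if c == cx else c for c in comp]
--     return [0 if s == t else
--             -1 if comp[s] != comp[t] else
--             cand.get(comp[s], -1)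
--             for s, t in query]
-- ===== Notes on version B (the rewrite author's own statement) =====
-- stated objective: simpler
-- what changed: Replaces the union-find forest (recursive find with path compression, mutated across the answer comprehension) by a flat component-label array updated by relabelling on each merging edge, with per-label AND values kept in a dict; queries become plain array/dict lookups with no find() calls.
import Mathlib
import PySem

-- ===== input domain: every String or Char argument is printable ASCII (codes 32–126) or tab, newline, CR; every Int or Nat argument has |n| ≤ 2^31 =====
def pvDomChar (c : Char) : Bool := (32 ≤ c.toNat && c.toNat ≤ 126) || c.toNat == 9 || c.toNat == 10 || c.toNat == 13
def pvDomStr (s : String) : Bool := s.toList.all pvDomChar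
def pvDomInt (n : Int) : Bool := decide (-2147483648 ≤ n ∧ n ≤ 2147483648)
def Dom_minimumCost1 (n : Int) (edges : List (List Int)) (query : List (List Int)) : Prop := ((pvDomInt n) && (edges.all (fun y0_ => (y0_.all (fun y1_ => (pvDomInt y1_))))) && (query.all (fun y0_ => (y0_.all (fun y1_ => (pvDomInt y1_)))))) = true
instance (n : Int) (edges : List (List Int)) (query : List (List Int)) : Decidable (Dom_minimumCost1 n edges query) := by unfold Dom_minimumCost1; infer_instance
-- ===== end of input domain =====

-- B replaces A's union-find forest (recursive find with path compression, mutated even while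
-- answering queries) by a flat component-label list rebuilt on each merging edge plus a dict of
-- per-label AND values; same return value, simpler data structure (A also mutates no argument).


-- ===== PORT A =====
-- find(x): 'if fa[x] != x: fa[x] = find(fa[x]); return fa[x]' — returns the (possibly compressed)
-- parent list together with the root.  Python's recursion is modelled with fuel fa.length + 1,
-- which is proved sufficient on every input Pre_ admits; pyGet?/pySetD are Python-exact
-- (negative indices wrap, as in A).
def pvFind : Nat → List Int → Int → List Int × Int
  | 0, fa, x => (fa, x)
  | fuel + 1, fa, x =>
    match PySem.List.pyGet? fa x with
    | none => (fa, x)                 -- IndexError in Python; outside Pre_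
    | some p =>
      if p = x then (fa, x)
      else
        let q := pvFind fuel fa p
        (PySem.List.pySetD q.1 x q.2, q.2)

-- one iteration of 'for x, y, w in edges' over the state (fa, and_)
def pvStepA (st : List Int × List Int) (e : List Int) : List Int × List Int :=
  match e with
  | [x, y, w] =>
    let f1 := pvFind (st.1.length + 1) st.1 x
    let f2 := pvFind (f1.1.length + 1) f1.1 y
    let and2 := PySem.List.pySetD st.2 f2.2 (PySem.Int.band (PySem.List.pyGetD st.2 f2.2 0) w)
    if f1.2 ≠ f2.2 then
      (PySem.List.pySetD f2.1 f1.2 f2.2,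
       PySem.List.pySetD and2 f2.2 (PySem.Int.band (PySem.List.pyGetD and2 f2.2 0) (PySem.List.pyGetD and2 f1.2 0)))
    else (f2.1, and2)
  | _ => st                           -- unpacking ValueError in Python; outside Pre_

-- the answer comprehension; find(s)/find(t)/find(s) are evaluated in Python's order, threading fa
def pvQueryA (fa and_ : List Int) : List (List Int) → List Int
  | [] => []
  | q :: rest =>
    match q with
    | [s, t] =>
      if s = t then 0 :: pvQueryA fa and_ rest
      else
        let f1 := pvFind (fa.length + 1) fa s
        let f2 := pvFind (f1.1.length + 1) f1.1 t
        if f1.2 ≠ f2.2 then (-1) :: pvQueryA f2.1 and_ rest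
        else
          let f3 := pvFind (f2.1.length + 1) f2.1 s
          PySem.List.pyGetD and_ f3.2 0 :: pvQueryA f3.1 and_ rest
    | _ => pvQueryA fa and_ rest      -- unpacking ValueError in Python; outside Pre_

def minimumCost1 (n : Int) (edges : List (List Int)) (query : List (List Int)) : List Int :=
  let fa := PySem.List.pyRange 0 n 1                 -- [i for i in range(n)]
  let and_ := List.replicate n.toNat (-1 : Int)      -- [-1] * n
  let st := edges.foldl pvStepA (fa, and_)
  pvQueryA st.1 st.2 query

-- ===== PORT B =====
-- one iteration of B's edge loop over the state (comp, cand)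
def pvStepB (st : List Int × PySem.Dict Int Int) (e : List Int) : List Int × PySem.Dict Int Int :=
  match e with
  | [x, y, w] =>
    let cx := PySem.List.pyGetD st.1 x 0
    let cy := PySem.List.pyGetD st.1 y 0
    let cand1 := st.2.insert cy (PySem.Int.band (st.2.getD cy (-1)) w)
    if cx ≠ cy then
      (st.1.map (fun c => if c = cx then cy else c),
       cand1.insert cy (PySem.Int.band (cand1.getD cy (-1)) (cand1.getD cx (-1))))
    else (st.1, cand1)
  | _ => st                           -- unpacking ValueError in Python; outside Pre_

def minimumCost1_alt (n : Int) (edges : List (List Int)) (query : List (List Int)) : List Int :=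
  let st := edges.foldl pvStepB (PySem.List.pyRange 0 n 1, PySem.Dict.empty)
  query.map (fun q =>
    match q with
    | [s, t] =>
      if s = t then 0
      else if PySem.List.pyGetD st.1 s 0 ≠ PySem.List.pyGetD st.1 t 0 then -1
      else st.2.getD (PySem.List.pyGetD st.1 s 0) (-1)
    | _ => 0)                         -- unpacking ValueError in Python; outside Pre_

-- ===== PRECONDITION & SPEC =====
-- Pre_ admits exactly the inputs where Python A returns: every edge is a 3-list and every query a
-- 2-list (else unpacking raises ValueError), and every index that is actually used to subscript a
-- list is Python-in-range, i.e. -n ≤ i < n (else IndexError); a query [s, s] never subscripts, so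
-- it is admitted with any s.
def pvEdgeOK (n : Int) (e : List Int) : Bool :=
  match e with
  | [x, y, _] => decide (-n ≤ x ∧ x < n ∧ -n ≤ y ∧ y < n)
  | _ => false

def pvQueryOK (n : Int) (q : List Int) : Bool :=
  match q with
  | [s, t] => decide (s = t ∨ (-n ≤ s ∧ s < n ∧ -n ≤ t ∧ t < n))
  | _ => false

def Pre_minimumCost1 (n : Int) (edges : List (List Int)) (query : List (List Int)) : Prop :=
  edges.all (pvEdgeOK n) = true ∧ query.all (pvQueryOK n) = true

instance (n : Int) (edges : List (List Int)) (query : List (List Int)) : Decidable (Pre_minimumCost1 n edges query) := by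
  unfold Pre_minimumCost1; infer_instance

def pvWitness_minimumCost1 : Int × List (List Int) × List (List Int) :=
  (1, [], [[3, 3]])

def Spec_minimumCost1 (n : Int) (edges : List (List Int)) (query : List (List Int)) (out : List Int) : Prop := out = minimumCost1_alt n edges query
instance (n : Int) (edges : List (List Int)) (query : List (List Int)) (out : List Int) : Decidable (Spec_minimumCost1 n edges query out) := by unfold Spec_minimumCost1; infer_instance

-- ===== CLAIM (what is proved, stated in full; the proofs are below) =====
def Claim_equal_minimumCost1 : Prop := ∀ (n : Int) (edges : List (List Int)) (query : List (List Int)), Dom_minimumCost1 n edges query → Pre_minimumCost1 n edges query → Spec_minimumCost1 n edges query (minimumCost1 n edges query)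

-- ===== LEMMAS AND PROOFS =====

def nrm (len : Nat) (i : Int) : Nat := if 0 ≤ i then i.toNat else len - (-i).toNat

def parF (fa : List Int) (i : Nat) : Nat := (fa.getD i 0).toNat

def GoodFa (fa : List Int) : Prop := ∀ i, i < fa.length → 0 ≤ fa.getD i 0 ∧ (fa.getD i 0).toNat < fa.length

inductive ReachD (fa : List Int) : Nat → Nat → Nat → Prop
  | root (i : Nat) : parF fa i = i → ReachD fa i i 0
  | step (i r d : Nat) : parF fa i ≠ i → ReachD fa (parF fa i) r d → ReachD fa i r (d + 1)

def rcF (fa : List Int) : Nat := (List.range fa.length).countP (fun i => parF fa i = i)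

def UF (fa : List Int) : Prop :=
  GoodFa fa ∧ ∀ i, i < fa.length → ∃ r d, ReachD fa i r d ∧ d + rcF fa ≤ fa.length

def SimF (fa fa' : List Int) : Prop :=
  fa'.length = fa.length ∧ (∀ j, parF fa' j = j ↔ parF fa j = j) ∧
  (∀ j s e, ReachD fa j s e → ∃ e', e' ≤ e ∧ ReachD fa' j s e')

theorem reach_det {fa : List Int} {i r d r' d' : Nat}
    (h : ReachD fa i r d) (h' : ReachD fa i r' d') : r = r' ∧ d = d' := by
  induction h generalizing d' with
  | root i hi => cases h' with
    | root => exact ⟨rfl, rfl⟩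
    | step _ _ _ hne => exact absurd hi hne
  | step i r d hne htail ih => cases h' with
    | root _ hi => exact absurd hi hne
    | step _ _ d2 _ htail2 =>
        obtain ⟨h1, h2⟩ := ih htail2
        exact ⟨h1, by omega⟩

theorem reach_root {fa : List Int} {i r d : Nat} (h : ReachD fa i r d) : parF fa r = r := by
  induction h with
  | root _ hi => exact hi
  | step _ _ _ _ _ ih => exact ih

theorem reach_lt {fa : List Int} {i r d : Nat} (hg : GoodFa fa) (hi : i < fa.length)
    (h : ReachD fa i r d) : r < fa.length := by
  induction h with
  | root _ _ => exact hi
  | step j _ _ _ _ ih => exact ih ((hg j hi).2)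

theorem parF_set {fa : List Int} {k : Nat} (v : Nat) (hk : k < fa.length) (j : Nat) :
    parF (fa.set k (v : Int)) j = if j = k then v else parF fa j := by
  unfold parF
  rcases Nat.lt_or_ge j fa.length with hj | hj
  · rw [List.getD_eq_getElem _ _ (by simpa using hj), List.getElem_set]
    split_ifs with h1 h2 h3
    · simp
    · simp_all
    · simp_all
    · rw [List.getD_eq_getElem _ _ hj]
  · have hjk : j ≠ k := by omega
    simp only [hjk, if_false]
    rw [List.getD_eq_default _ _ (by simpa using hj), List.getD_eq_default _ _ hj]

theorem rcF_congr {fa fa' : List Int} (hl : fa'.length = fa.length)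
    (hr : ∀ j, parF fa' j = j ↔ parF fa j = j) : rcF fa' = rcF fa := by
  unfold rcF
  rw [hl]
  exact List.countP_congr (fun j _ => by simp [hr j])

theorem countP_lt_of_witness {l : List Nat} {p q : Nat → Bool} {a : Nat}
    (ha : a ∈ l) (hpa : p a = true) (hqa : q a = false) (himp : ∀ x, q x = true → p x = true) :
    l.countP q < l.countP p := by
  induction l with
  | nil => cases ha
  | cons b t ih =>
    have hmono : t.countP q ≤ t.countP p :=
      List.countP_mono_left (fun x _ hx => himp x hx)
    rcases List.mem_cons.mp ha with rfl | hb
    · simp [List.countP_cons, hpa, hqa]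
      omega
    · have := ih hb
      simp only [List.countP_cons]
      have h2 : (if q b = true then 1 else 0) ≤ (if p b = true then 1 else 0) := by
        by_cases hq : q b = true
        · simp [hq, himp b hq]
        · simp [hq]
      omega

theorem simF_refl (fa : List Int) : SimF fa fa :=
  ⟨rfl, fun _ => Iff.rfl, fun j s e h => ⟨e, le_refl _, h⟩⟩

theorem simF_trans {fa fb fc : List Int} (h1 : SimF fa fb) (h2 : SimF fb fc) : SimF fa fc := by
  obtain ⟨l1, r1, t1⟩ := h1
  obtain ⟨l2, r2, t2⟩ := h2
  refine ⟨l2.trans l1, fun j => (r2 j).trans (r1 j), fun j s e h => ?_⟩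
  obtain ⟨e1, he1, hr1⟩ := t1 j s e h
  obtain ⟨e2, he2, hr2⟩ := t2 j s e1 hr1
  exact ⟨e2, le_trans he2 he1, hr2⟩

theorem simF_UF {fa fa' : List Int} (hs : SimF fa fa') (hg' : GoodFa fa') (hu : UF fa) : UF fa' := by
  obtain ⟨hl, hroots, htrans⟩ := hs
  obtain ⟨hg, hd⟩ := hu
  refine ⟨hg', fun i hi => ?_⟩
  obtain ⟨r, d, hr, hb⟩ := hd i (by omega)
  obtain ⟨e, he, hr'⟩ := htrans i r d hr
  exact ⟨r, e, hr', by rw [hl, rcF_congr hl hroots]; omega⟩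

def Coupled (n : Int) (fa and_ comp : List Int) (cand : PySem.Dict Int Int) : Prop :=
  fa.length = n.toNat ∧ and_.length = n.toNat ∧ comp.length = n.toNat ∧
  UF fa ∧
  (∀ i j ri rj di dj, i < n.toNat → j < n.toNat → ReachD fa i ri di → ReachD fa j rj dj →
      (ri = rj ↔ comp.getD i 0 = comp.getD j 0)) ∧
  (∀ i ri di, i < n.toNat → ReachD fa i ri di → and_.getD ri 0 = cand.getD (comp.getD i 0) (-1))

theorem simF_coupled {n : Int} {fa fa' and_ comp : List Int} {cand : PySem.Dict Int Int}
    (hc : Coupled n fa and_ comp cand) (hs : SimF fa fa') (hg' : GoodFa fa') :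
    Coupled n fa' and_ comp cand := by
  obtain ⟨hlf, hla, hlc, hu, hpart, hval⟩ := hc
  obtain ⟨hl, hroots, htrans⟩ := hs
  have hback : ∀ i ri di, i < n.toNat → ReachD fa' i ri di → ∃ d0, ReachD fa i ri d0 := by
    intro i ri di hi h'
    obtain ⟨r, d, hr, _⟩ := hu.2 i (by omega)
    obtain ⟨e, _, hr'⟩ := htrans i r d hr
    obtain ⟨h1, _⟩ := reach_det h' hr'
    exact ⟨d, h1 ▸ hr⟩
  refine ⟨by omega, hla, hlc, simF_UF ⟨hl, hroots, htrans⟩ hg' hu, ?_, ?_⟩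
  · intro i j ri rj di dj hi hj hri hrj
    obtain ⟨d1, h1⟩ := hback i ri di hi hri
    obtain ⟨d2, h2⟩ := hback j rj dj hj hrj
    exact hpart i j ri rj d1 d2 hi hj h1 h2
  · intro i ri di hi hri
    obtain ⟨d1, h1⟩ := hback i ri di hi hri
    exact hval i ri d1 hi h1

theorem compressF {fa : List Int} {x r dx : Nat}
    (hg : GoodFa fa) (hxlen : x < fa.length) (hrlen : r < fa.length) (hxr : x ≠ r)
    (hx : ReachD fa x r dx) :
    SimF fa (fa.set x (r : Int)) ∧ GoodFa (fa.set x (r : Int)) := by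
  have hrr : parF fa r = r := reach_root hx
  have hxnr : parF fa x ≠ x := by
    intro h
    exact hxr (reach_det (ReachD.root x h) hx).1
  have hpar : ∀ j, parF (fa.set x (r : Int)) j = if j = x then r else parF fa j :=
    parF_set r hxlen
  have hgood : GoodFa (fa.set x (r : Int)) := by
    intro i hi
    rw [List.length_set] at hi
    rcases eq_or_ne i x with rfl | hne
    · rw [List.getD_eq_getElem _ _ (by simpa using hi), List.getElem_set_self (by simpa using hi)]
      constructor
      · exact_mod_cast Nat.zero_le r
      · simpa using hrlen
    · have : (fa.set x (r : Int)).getD i 0 = fa.getD i 0 := by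
        rcases Nat.lt_or_ge i fa.length with h | h
        · rw [List.getD_eq_getElem _ _ (by simpa using hi),
            List.getElem_set_ne (by omega), List.getD_eq_getElem _ _ h]
        · omega
      rw [List.length_set, this]
      exact hg i (by omega)
  refine ⟨⟨List.length_set .., ?_, ?_⟩, hgood⟩
  · intro j
    rw [hpar j]
    rcases eq_or_ne j x with rfl | hne
    · rw [if_pos rfl]
      constructor
      · intro h; exact absurd h.symm hxr
      · intro h; exact absurd h hxnr
    · rw [if_neg hne]
  · intro j s e h
    induction h with
    | root j hj =>
      have hjx : j ≠ x := by
        intro h; subst h; exact hxnr hj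
      exact ⟨0, le_refl _, ReachD.root j (by rw [hpar, if_neg hjx]; exact hj)⟩
    | step j s e hne htail ih =>
      rcases eq_or_ne j x with rfl | hjx
      · have hsr : s = r := (reach_det (ReachD.step j s e hne htail) hx).1
        subst hsr
        refine ⟨1, by omega, ReachD.step j s 0 ?_ ?_⟩
        · rw [hpar, if_pos rfl]; exact fun h => hxr h.symm
        · rw [hpar, if_pos rfl]
          exact ReachD.root s (by rw [hpar, if_neg (fun h => hxr h.symm)]; exact hrr)
      · obtain ⟨e', he', htail'⟩ := ih
        refine ⟨e' + 1, by omega, ReachD.step j s e' ?_ ?_⟩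
        · rw [hpar, if_neg hjx]; exact hne
        · rw [hpar, if_neg hjx]; exact htail'

theorem merge_reach {fa : List Int} {rx ry : Nat}
    (hrx : parF fa rx = rx) (hry : parF fa ry = ry) (hne : rx ≠ ry) (hrxl : rx < fa.length) :
    ∀ {j s e}, ReachD fa j s e →
      (s = rx → ReachD (fa.set rx (ry : Int)) j ry (e + 1)) ∧
      (s ≠ rx → ReachD (fa.set rx (ry : Int)) j s e) := by
  have hpar : ∀ j, parF (fa.set rx (ry : Int)) j = if j = rx then ry else parF fa j :=
    parF_set ry hrxl
  intro j s e h
  induction h with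
  | root j hj =>
    constructor
    · rintro rfl
      refine ReachD.step j ry 0 ?_ ?_
      · rw [hpar, if_pos rfl]; exact fun h => hne h.symm
      · rw [hpar, if_pos rfl]
        exact ReachD.root ry (by rw [hpar, if_neg (fun h => hne h.symm)]; exact hry)
    · intro hs
      exact ReachD.root j (by rw [hpar, if_neg hs]; exact hj)
  | step j s e hjne htail ih =>
    have hjx : j ≠ rx := by
      intro h; subst h; exact hjne hrx
    constructor
    · rintro rfl
      refine ReachD.step j ry (e + 1) ?_ ?_
      · rw [hpar, if_neg hjx]; exact hjne
      · rw [hpar, if_neg hjx]; exact ih.1 rfl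
    · intro hs
      refine ReachD.step j s e ?_ ?_
      · rw [hpar, if_neg hjx]; exact hjne
      · rw [hpar, if_neg hjx]; exact ih.2 hs

theorem getD_map_lt {l : List Int} {i : Nat} (f : Int → Int) (hi : i < l.length) :
    (l.map f).getD i 0 = f (l.getD i 0) := by
  rw [List.getD_eq_getElem _ _ (by simpa using hi), List.getD_eq_getElem _ _ hi,
    List.getElem_map]

theorem nrm_lt {len : Nat} {i : Int} (h0 : -(len : Int) ≤ i) (h1 : i < len) :
    nrm len i < len := by
  unfold nrm; split <;> omega

theorem pyIdx_nrm {len : Nat} {i : Int} (h0 : -(len : Int) ≤ i) (h1 : i < len) :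
    PySem.List.pyIdx? len i = some (nrm len i) := by
  unfold PySem.List.pyIdx? nrm
  split <;> simp_all

theorem pyGetD_nrm {xs : List Int} {i : Int} (d : Int)
    (h0 : -(xs.length : Int) ≤ i) (h1 : i < xs.length) :
    PySem.List.pyGetD xs i d = xs.getD (nrm xs.length i) d := by
  unfold PySem.List.pyGetD PySem.List.pyGet?
  rw [pyIdx_nrm h0 h1]
  simp only [Option.bind_some]
  rw [List.getElem?_eq_getElem (nrm_lt h0 h1), List.getD_eq_getElem _ _ (nrm_lt h0 h1)]
  rfl

theorem pySetD_nrm {xs : List Int} {i : Int} (v : Int)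
    (h0 : -(xs.length : Int) ≤ i) (h1 : i < xs.length) :
    PySem.List.pySetD xs i v = xs.set (nrm xs.length i) v := by
  unfold PySem.List.pySetD PySem.List.pySet?
  rw [pyIdx_nrm h0 h1]
  rfl

theorem pyGet_nrm {xs : List Int} {i : Int}
    (h0 : -(xs.length : Int) ≤ i) (h1 : i < xs.length) :
    PySem.List.pyGet? xs i = some (xs.getD (nrm xs.length i) 0) := by
  unfold PySem.List.pyGet?
  rw [pyIdx_nrm h0 h1]
  simp only [Option.bind_some]
  rw [List.getElem?_eq_getElem (nrm_lt h0 h1), List.getD_eq_getElem _ _ (nrm_lt h0 h1)]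

theorem getD_parF {fa : List Int} {i : Nat} (hg : GoodFa fa) (hi : i < fa.length) :
    fa.getD i 0 = ((parF fa i : Nat) : Int) := by
  have := (hg i hi).1
  unfold parF
  omega

theorem find_spec_nat {fa : List Int} {x r d : Nat} {fuel : Nat}
    (hg : GoodFa fa) (hx : x < fa.length) (hr : ReachD fa x r d) (hf : d + 1 ≤ fuel) :
    ∃ fa', pvFind fuel fa (x : Int) = (fa', (r : Int)) ∧ SimF fa fa' ∧ GoodFa fa' := by
  induction hr generalizing fuel with
  | root i hi =>
    obtain ⟨f, rfl⟩ : ∃ f, fuel = f + 1 := ⟨fuel - 1, by omega⟩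
    refine ⟨fa, ?_, simF_refl fa, hg⟩
    unfold pvFind
    rw [pyGet_nrm (by omega) (by exact_mod_cast hx)]
    have hn : nrm fa.length (i : Int) = i := by unfold nrm; simp
    rw [hn, getD_parF hg hx, hi]
    simp
  | step i s e hne htail ih =>
    obtain ⟨f, rfl⟩ : ∃ f, fuel = f + 1 := ⟨fuel - 1, by omega⟩
    have hp : parF fa i < fa.length := (hg i hx).2
    obtain ⟨fa1, heq, hsim1, hg1⟩ := ih (fuel := f) hp (by omega)
    have hrlt : s < fa.length := reach_lt hg hp htail
    have hine : i ≠ s := by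
      intro h
      have h0 : ReachD fa i i 0 := ReachD.root i (h ▸ reach_root htail)
      have h1 : ReachD fa i s (e + 1) := ReachD.step i s e hne htail
      have := (reach_det h0 h1).2
      omega
    obtain ⟨e1, _, hchain1⟩ := hsim1.2.2 i s (e + 1) (ReachD.step i s e hne htail)
    have hcomp := compressF hg1 (by rw [hsim1.1]; exact hx) (by rw [hsim1.1]; exact hrlt)
      hine hchain1
    refine ⟨fa1.set i ((s : Nat) : Int), ?_, simF_trans hsim1 hcomp.1, hcomp.2⟩
    unfold pvFind
    rw [pyGet_nrm (by omega) (by exact_mod_cast hx)]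
    have hn : nrm fa.length (i : Int) = i := by unfold nrm; simp
    rw [hn, getD_parF hg hx]
    dsimp only
    have hpne : ¬ ((parF fa i : Nat) : Int) = (i : Int) := by
      intro h
      exact hne (by exact_mod_cast h)
    rw [if_neg hpne, heq]
    dsimp only
    rw [pySetD_nrm _ (by omega) (by rw [hsim1.1]; exact_mod_cast hx)]
    rw [hsim1.1, hn]

theorem find_spec_int {fa : List Int} {x : Int} {r d : Nat} {fuel : Nat}
    (hg : GoodFa fa) (hx0 : -(fa.length : Int) ≤ x) (hx1 : x < fa.length)
    (hr : ReachD fa (nrm fa.length x) r d) (hf : d + 2 ≤ fuel) :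
    ∃ fa', pvFind fuel fa x = (fa', (r : Int)) ∧ SimF fa fa' ∧ GoodFa fa' := by
  rcases le_or_gt 0 x with hx | hx
  · have hxx : x = ((x.toNat : Nat) : Int) := by omega
    have hn : nrm fa.length x = x.toNat := by unfold nrm; simp [hx]
    rw [hxx]
    exact find_spec_nat hg (by omega) (hn ▸ hr) (by omega)
  · obtain ⟨f, rfl⟩ : ∃ f, fuel = f + 1 := ⟨fuel - 1, by omega⟩
    have hnx : nrm fa.length x < fa.length := nrm_lt hx0 hx1
    unfold pvFind
    rw [pyGet_nrm hx0 hx1, getD_parF hg hnx]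
    dsimp only
    have hpne : ¬ ((parF fa (nrm fa.length x) : Nat) : Int) = x := by
      intro h
      omega
    rw [if_neg hpne]
    have hplt : parF fa (nrm fa.length x) < fa.length := (hg _ hnx).2
    cases hr with
    | root _ hi =>
      rw [hi]
      obtain ⟨fa1, heq, hsim1, hg1⟩ := find_spec_nat (x := nrm fa.length x) hg hnx
        (ReachD.root _ hi) (fuel := f) (by omega)
      rw [heq]
      dsimp only
      have hset : PySem.List.pySetD fa1 x ((nrm fa.length x : Nat) : Int)
          = fa1.set (nrm fa.length x) ((nrm fa.length x : Nat) : Int) := by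
        rw [pySetD_nrm _ (by rw [hsim1.1]; exact hx0) (by rw [hsim1.1]; exact hx1), hsim1.1]
      rw [hset]
      have hpar2 : ∀ j, parF (fa1.set (nrm fa.length x) ((nrm fa.length x : Nat) : Int)) j
          = parF fa1 j := by
        intro j
        rw [parF_set _ (by rw [hsim1.1]; exact hnx)]
        split
        · rename_i hj
          subst hj
          exact ((hsim1.2.1 _).mpr hi).symm
        · rfl
      have hlen2 : (fa1.set (nrm fa.length x) ((nrm fa.length x : Nat) : Int)).length
          = fa1.length := List.length_set ..
      have hsim2 : SimF fa1 (fa1.set (nrm fa.length x) ((nrm fa.length x : Nat) : Int)) := by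
        refine ⟨hlen2, fun j => by rw [hpar2], fun j s e h => ⟨e, le_refl _, ?_⟩⟩
        induction h with
        | root j hj => exact ReachD.root j (by rw [hpar2]; exact hj)
        | step j s e hne2 htail2 ih2 =>
          refine ReachD.step j s e ?_ ?_
          · rw [hpar2]; exact hne2
          · rw [hpar2]; exact ih2
      have hg2 : GoodFa (fa1.set (nrm fa.length x) ((nrm fa.length x : Nat) : Int)) := by
        intro i hi2
        rw [hlen2] at hi2
        rcases eq_or_ne i (nrm fa.length x) with rfl | hne2
        · rw [List.getD_eq_getElem _ _ (by simpa [hlen2] using hi2),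
            List.getElem_set_self (by simpa using hi2), hlen2]
          constructor
          · positivity
          · simpa [hsim1.1] using hnx
        · have heqd : (fa1.set (nrm fa.length x) ((nrm fa.length x : Nat) : Int)).getD i 0
              = fa1.getD i 0 := by
            rw [List.getD_eq_getElem _ _ (by simpa [hlen2] using hi2),
              List.getElem_set_ne (by omega), List.getD_eq_getElem _ _ hi2]
          rw [hlen2, heqd]
          exact hg1 i hi2
      exact ⟨_, rfl, simF_trans hsim1 hsim2, hg2⟩
    | step _ _ _ hne htail =>
      obtain ⟨fa1, heq, hsim1, hg1⟩ := find_spec_nat (fuel := f) hg hplt htail (by omega)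
      rw [heq]
      dsimp only
      have hrlt : r < fa.length := reach_lt hg hplt htail
      have hne2 : nrm fa.length x ≠ r := by
        intro h
        apply hne
        rw [h]
        exact reach_root htail
      obtain ⟨e1, _, hchain1⟩ := hsim1.2.2 _ r _ (ReachD.step _ _ _ hne htail)
      have hcomp := compressF hg1 (by rw [hsim1.1]; exact hnx) (by rw [hsim1.1]; exact hrlt)
        hne2 hchain1
      have hset : PySem.List.pySetD fa1 x ((r : Nat) : Int)
          = fa1.set (nrm fa.length x) ((r : Nat) : Int) := by
        rw [pySetD_nrm _ (by rw [hsim1.1]; exact hx0) (by rw [hsim1.1]; exact hx1), hsim1.1]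
      rw [hset]
      exact ⟨_, rfl, simF_trans hsim1 hcomp.1, hcomp.2⟩

theorem good_set {fa : List Int} {k v : Nat} (hg : GoodFa fa) (hk : k < fa.length)
    (hv : v < fa.length) : GoodFa (fa.set k ((v : Nat) : Int)) := by
  intro i hi
  rw [List.length_set] at hi
  rcases eq_or_ne i k with rfl | hne
  · rw [List.getD_eq_getElem _ _ (by simpa using hi), List.getElem_set_self (by simpa using hi),
      List.length_set]
    exact ⟨by positivity, by simpa using hv⟩
  · have heqd : (fa.set k ((v : Nat) : Int)).getD i 0 = fa.getD i 0 := by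
      rw [List.getD_eq_getElem _ _ (by simpa using hi), List.getElem_set_ne (by omega),
        List.getD_eq_getElem _ _ hi]
    rw [List.length_set, heqd]
    exact hg i hi

theorem getD_set_self {l : List Int} {k : Nat} (v : Int) (hk : k < l.length) :
    (l.set k v).getD k 0 = v := by
  rw [List.getD_eq_getElem _ _ (by simpa using hk), List.getElem_set_self (by simpa using hk)]

theorem getD_set_ne {l : List Int} {k j : Nat} (v : Int) (hj : j ≠ k) :
    (l.set k v).getD j 0 = l.getD j 0 := by
  rcases Nat.lt_or_ge j l.length with h | h
  · rw [List.getD_eq_getElem _ _ (by simpa using h), List.getElem_set_ne (by omega),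
      List.getD_eq_getElem _ _ h]
  · rw [List.getD_eq_default _ _ (by simpa using h), List.getD_eq_default _ _ h]

theorem rcF_pos {fa : List Int} {r : Nat} (hr : parF fa r = r) (hlt : r < fa.length) :
    1 ≤ rcF fa := by
  unfold rcF
  rw [Nat.succ_le_iff, List.countP_pos_iff]
  exact ⟨r, List.mem_range.mpr hlt, by simpa using hr⟩

-- merging fa[rx] := ry strictly decreases the number of roots

theorem rcF_merge_lt {fa : List Int} {rx ry : Nat}
    (hrx : parF fa rx = rx) (hne : rx ≠ ry) (hrxl : rx < fa.length) :
    rcF (fa.set rx ((ry : Nat) : Int)) < rcF fa := by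
  have hpar := parF_set (fa := fa) (k := rx) ry hrxl
  unfold rcF
  rw [List.length_set]
  refine countP_lt_of_witness (a := rx) (List.mem_range.mpr hrxl) (by simpa using hrx) ?_ ?_
  · simp only [decide_eq_false_iff_not]
    rw [hpar rx, if_pos rfl]
    exact fun h => hne h.symm
  · intro j hj
    simp only [decide_eq_true_eq] at hj ⊢
    rw [hpar j] at hj
    by_cases h : j = rx
    · subst h; rw [if_pos rfl] at hj; exact absurd hj.symm hne
    · rwa [if_neg h] at hj

-- B-visible class representative: some node j of the class of root r has comp label c

def ClassRep (n : Int) (fa2 comp : List Int) (r : Nat) (c : Int) : Prop :=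
  ∃ j dj, j < n.toNat ∧ ReachD fa2 j r dj ∧ comp.getD j 0 = c

-- the unconditional part of an edge step: and_[ry] &= w   /   cand[cy] = cand.get(cy, -1) & w

theorem coupled_update_eq {n : Int} {fa2 and_ comp : List Int} {cand : PySem.Dict Int Int}
    {ry : Nat} {w cy : Int}
    (hc : Coupled n fa2 and_ comp cand) (hrep : ClassRep n fa2 comp ry cy) :
    Coupled n fa2 (and_.set ry (PySem.Int.band (and_.getD ry 0) w)) comp
      (cand.insert cy (PySem.Int.band (cand.getD cy (-1)) w)) := by
  obtain ⟨hlf, hla, hlc, hu, hpart, hval⟩ := hc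
  obtain ⟨j0, dj0, hj0, hrj0, hcj0⟩ := hrep
  refine ⟨hlf, by rw [List.length_set]; exact hla, hlc, hu, hpart, ?_⟩
  intro i ri di hi hri
  have hlab := hpart i j0 ri ry di dj0 hi hj0 hri hrj0
  rcases eq_or_ne ri ry with rfl | hne
  · rw [getD_set_self _ (by rw [hla, ← hlf]; exact reach_lt hu.1 (by rw [hlf]; exact hj0) hrj0),
      PySem.Dict.getD_insert]
    rw [hcj0] at hlab
    rw [if_pos (hlab.mp rfl)]
    have hv0 := hval j0 ri dj0 hj0 hrj0
    rw [hcj0] at hv0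
    rw [hv0]
  · rw [getD_set_ne _ hne, PySem.Dict.getD_insert]
    rw [if_neg (by rw [← hcj0]; exact fun h => hne (hlab.mpr h))]
    exact hval i ri di hi hri

-- the merging part: fa[rx] := ry, and_[ry] &= and_[rx]  /  relabel cx → cy, cand[cy] &= cand[cx]

theorem coupled_merge {n : Int} {fa2 and2 comp : List Int} {cand1 : PySem.Dict Int Int}
    {rx ry : Nat} {cx cy : Int}
    (hc : Coupled n fa2 and2 comp cand1) (hne : rx ≠ ry)
    (hx : ClassRep n fa2 comp rx cx) (hy : ClassRep n fa2 comp ry cy) :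
    Coupled n (fa2.set rx ((ry : Nat) : Int))
      (and2.set ry (PySem.Int.band (and2.getD ry 0) (and2.getD rx 0)))
      (comp.map fun c => if c = cx then cy else c)
      (cand1.insert cy (PySem.Int.band (cand1.getD cy (-1)) (cand1.getD cx (-1)))) := by
  obtain ⟨hlf, hla, hlc, hu, hpart, hval⟩ := hc
  obtain ⟨jx, djx, hjx, hrjx, hcjx⟩ := hx
  obtain ⟨jy, djy, hjy, hrjy, hcjy⟩ := hy
  have hrxroot : parF fa2 rx = rx := reach_root hrjx
  have hryroot : parF fa2 ry = ry := reach_root hrjy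
  have hrxlt : rx < fa2.length := reach_lt hu.1 (by rw [hlf]; exact hjx) hrjx
  have hrylt : ry < fa2.length := reach_lt hu.1 (by rw [hlf]; exact hjy) hrjy
  have hcxcy : cx ≠ cy := by
    have := hpart jx jy rx ry djx djy hjx hjy hrjx hrjy
    rw [hcjx, hcjy] at this
    exact fun h => hne (this.mpr h)
  have hrc := rcF_merge_lt hrxroot hne hrxlt
  have hmerge : ∀ {j s e}, ReachD fa2 j s e →
      (s = rx → ReachD (fa2.set rx ((ry : Nat) : Int)) j ry (e + 1)) ∧
      (s ≠ rx → ReachD (fa2.set rx ((ry : Nat) : Int)) j s e) :=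
    fun h => merge_reach hrxroot hryroot hne hrxlt h
  -- back-translation: every chain in the merged forest comes from a chain in fa2
  have hback : ∀ i ri di, i < n.toNat → ReachD (fa2.set rx ((ry : Nat) : Int)) i ri di →
      ∃ si ei, ReachD fa2 i si ei ∧ ri = (if si = rx then ry else si) := by
    intro i ri di hi h'
    obtain ⟨si, ei, hsi, _⟩ := hu.2 i (by rw [hlf]; exact hi)
    rcases eq_or_ne si rx with rfl | hsne
    · have := (hmerge hsi).1 rfl
      exact ⟨si, ei, hsi, by rw [if_pos rfl]; exact (reach_det h' this).1⟩
    · have := (hmerge hsi).2 hsne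
      exact ⟨si, ei, hsi, by rw [if_neg hsne]; exact (reach_det h' this).1⟩
  -- labels after the relabelling
  have hlab : ∀ i, i < n.toNat →
      (comp.map fun c => if c = cx then cy else c).getD i 0
        = (if comp.getD i 0 = cx then cy else comp.getD i 0) :=
    fun i hi => getD_map_lt _ (by rw [hlc]; exact hi)
  -- root ↦ label dictionary on class representatives
  have hroot_lab : ∀ i si ei, i < n.toNat → ReachD fa2 i si ei →
      ((si = rx ↔ comp.getD i 0 = cx) ∧ (si = ry ↔ comp.getD i 0 = cy)) := by
    intro i si ei hi hsi
    constructor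
    · have := hpart i jx si rx ei djx hi hjx hsi hrjx
      rw [hcjx] at this; exact this
    · have := hpart i jy si ry ei djy hi hjy hsi hrjy
      rw [hcjy] at this; exact this
  refine ⟨by rw [List.length_set]; exact hlf, by rw [List.length_set]; exact hla,
    by rw [List.length_map]; exact hlc, ?_, ?_, ?_⟩
  · -- UF of the merged forest
    refine ⟨good_set hu.1 hrxlt hrylt, ?_⟩
    intro i hi
    rw [List.length_set] at hi
    obtain ⟨si, ei, hsi, hbi⟩ := hu.2 i hi
    rcases eq_or_ne si rx with rfl | hsne
    · exact ⟨ry, ei + 1, (hmerge hsi).1 rfl, by rw [List.length_set]; omega⟩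
    · exact ⟨si, ei, (hmerge hsi).2 hsne, by rw [List.length_set]; omega⟩
  · -- partition invariant
    intro i j ri rj di dj hi hj hri hrj
    obtain ⟨si, ei, hsi, rfl⟩ := hback i ri di hi hri
    obtain ⟨sj, ej, hsj, rfl⟩ := hback j rj dj hj hrj
    rw [hlab i hi, hlab j hj]
    have hij := hpart i j si sj ei ej hi hj hsi hsj
    obtain ⟨hix, hiy⟩ := hroot_lab i si ei hi hsi
    obtain ⟨hjx2, hjy2⟩ := hroot_lab j sj ej hj hsj
    by_cases h1 : si = rx <;> by_cases h2 : sj = rx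
    · rw [if_pos h1, if_pos h2, if_pos (hix.mp h1), if_pos (hjx2.mp h2)]
      simp
    · rw [if_pos h1, if_neg h2, if_pos (hix.mp h1), if_neg (fun hh => h2 (hjx2.mpr hh))]
      constructor
      · intro h; exact (hjy2.mp h.symm).symm
      · intro h; exact (hjy2.mpr h.symm).symm
    · rw [if_neg h1, if_pos h2, if_neg (fun hh => h1 (hix.mpr hh)), if_pos (hjx2.mp h2)]
      exact hiy
    · rw [if_neg h1, if_neg h2, if_neg (fun hh => h1 (hix.mpr hh)),
        if_neg (fun hh => h2 (hjx2.mpr hh))]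
      exact hij
  · -- value invariant
    intro i ri di hi hri
    obtain ⟨si, ei, hsi, rfl⟩ := hback i ri di hi hri
    rw [hlab i hi]
    obtain ⟨hix, hiy⟩ := hroot_lab i si ei hi hsi
    have hvi := hval i si ei hi hsi
    have hry_and : ry < and2.length := by rw [hla, ← hlf]; exact hrylt
    have hvy := hval jy ry djy hjy hrjy
    rw [hcjy] at hvy
    have hvx := hval jx rx djx hjx hrjx
    rw [hcjx] at hvx
    rcases eq_or_ne si rx with rfl | hsne
    · rw [if_pos rfl, if_pos (hix.mp rfl), getD_set_self _ hry_and,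
        PySem.Dict.getD_insert, if_pos rfl]
      rw [hix.mp rfl] at hvi
      rw [hvy, hvi]
    · rw [if_neg hsne]
      rcases eq_or_ne si ry with rfl | hsne2
      · rw [if_neg (fun h => hsne (hix.mpr h)), getD_set_self _ hry_and,
          PySem.Dict.getD_insert, if_pos (hiy.mp rfl)]
        rw [hiy.mp rfl] at hvi
        rw [hvi, hvx]
      · rw [if_neg (fun h => hsne (hix.mpr h)), getD_set_ne _ hsne2,
          PySem.Dict.getD_insert, if_neg (fun h => hsne2 (hiy.mpr h))]
        exact hvi

theorem edgeOK_shape {n : Int} {e : List Int} (he : pvEdgeOK n e = true) :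
    ∃ x y w, e = [x, y, w] ∧ -n ≤ x ∧ x < n ∧ -n ≤ y ∧ y < n := by
  unfold pvEdgeOK at he
  split at he
  · rename_i x y w
    simp only [decide_eq_true_eq] at he
    exact ⟨x, y, w, rfl, he.1, he.2.1, he.2.2.1, he.2.2.2⟩
  · cases he

theorem stepAB_coupled {n : Int} {fa and_ comp : List Int} {cand : PySem.Dict Int Int} {e : List Int}
    (he : pvEdgeOK n e = true) (hc : Coupled n fa and_ comp cand) :
    Coupled n (pvStepA (fa, and_) e).1 (pvStepA (fa, and_) e).2
      (pvStepB (comp, cand) e).1 (pvStepB (comp, cand) e).2 := by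
  obtain ⟨x, y, w, rfl, hx0, hx1, hy0, hy1⟩ := edgeOK_shape he
  have hn : 0 < n := by omega
  have hnat : ((n.toNat : Nat) : Int) = n := by omega
  obtain ⟨hlf, hla, hlc, hu, hpart, hval⟩ := hc
  -- first find
  have hxb0 : -(fa.length : Int) ≤ x := by rw [hlf]; omega
  have hxb1 : x < (fa.length : Int) := by rw [hlf]; omega
  obtain ⟨rx, dx, hrx, hbx⟩ := hu.2 (nrm fa.length x) (nrm_lt hxb0 hxb1)
  have hrxlt : rx < fa.length := reach_lt hu.1 (nrm_lt hxb0 hxb1) hrx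
  have hrc1 : 1 ≤ rcF fa := rcF_pos (reach_root hrx) hrxlt
  obtain ⟨fa1, heq1, hsim1, hg1⟩ :=
    find_spec_int (fuel := fa.length + 1) hu.1 hxb0 hxb1 hrx (by omega)
  have hc1 : Coupled n fa1 and_ comp cand := simF_coupled ⟨hlf, hla, hlc, hu, hpart, hval⟩ hsim1 hg1
  obtain ⟨hlf1, hla1, hlc1, hu1, hpart1, hval1⟩ := hc1
  -- second find
  have hyb0 : -(fa1.length : Int) ≤ y := by rw [hlf1]; omega
  have hyb1 : y < (fa1.length : Int) := by rw [hlf1]; omega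
  obtain ⟨ry, dy, hry, hby⟩ := hu1.2 (nrm fa1.length y) (nrm_lt hyb0 hyb1)
  have hrylt : ry < fa1.length := reach_lt hu1.1 (nrm_lt hyb0 hyb1) hry
  have hrc2 : 1 ≤ rcF fa1 := rcF_pos (reach_root hry) hrylt
  obtain ⟨fa2, heq2, hsim2, hg2⟩ :=
    find_spec_int (fuel := fa1.length + 1) hu1.1 hyb0 hyb1 hry (by omega)
  have hc2 : Coupled n fa2 and_ comp cand :=
    simF_coupled ⟨hlf1, hla1, hlc1, hu1, hpart1, hval1⟩ hsim2 hg2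
  -- chains to the two roots inside fa2
  obtain ⟨ex2, _, hrx2⟩ := (simF_trans hsim1 hsim2).2.2 _ rx dx hrx
  obtain ⟨ey2, _, hry2⟩ := hsim2.2.2 _ ry dy hry
  have hrepx : ClassRep n fa2 comp rx (comp.getD (nrm n.toNat x) 0) :=
    ⟨nrm fa.length x, ex2, by rw [← hlf]; exact nrm_lt hxb0 hxb1, hrx2, by rw [hlf]⟩
  have hrepy : ClassRep n fa2 comp ry (comp.getD (nrm n.toNat y) 0) :=
    ⟨nrm fa1.length y, ey2, by rw [← hlf1]; exact nrm_lt hyb0 hyb1, hry2,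
      by rw [hlf1]⟩
  -- the B-side accesses
  have hcompx : PySem.List.pyGetD comp x 0 = comp.getD (nrm n.toNat x) 0 := by
    rw [pyGetD_nrm _ (by rw [hlc]; omega) (by rw [hlc]; omega), hlc]
  have hcompy : PySem.List.pyGetD comp y 0 = comp.getD (nrm n.toNat y) 0 := by
    rw [pyGetD_nrm _ (by rw [hlc]; omega) (by rw [hlc]; omega), hlc]
  -- relate the two if-conditions
  have hkey : rx = ry ↔ comp.getD (nrm n.toNat x) 0 = comp.getD (nrm n.toNat y) 0 := by
    obtain ⟨_, _, _, _, hpart2, _⟩ := hc2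
    exact hpart2 (nrm n.toNat x) (nrm n.toNat y) rx ry ex2 ey2
      (by rw [← hlf]; exact nrm_lt hxb0 hxb1) (by rw [← hlf1]; exact nrm_lt hyb0 hyb1)
      (by rw [hlf] at hrx2; exact hrx2) (by rw [hlf1] at hry2; exact hry2)
  -- reduce the two steps
  simp only [pvStepA, pvStepB, heq1]
  rw [heq2]
  dsimp only
  rw [hcompx, hcompy]
  simp only [PySem.List.pyGetD_natCast, PySem.List.pySetD_natCast]
  by_cases hxy : rx = ry
  · rw [if_neg (show ¬((rx : Int) ≠ (ry : Int)) from fun h => h (by exact_mod_cast hxy)),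
      if_neg (show ¬(comp.getD (nrm n.toNat x) 0 ≠ comp.getD (nrm n.toNat y) 0) from
        fun h => h (hkey.mp hxy))]
    exact coupled_update_eq hc2 hrepy
  · rw [if_pos (show (rx : Int) ≠ (ry : Int) from fun h => hxy (by exact_mod_cast h)),
      if_pos (show comp.getD (nrm n.toNat x) 0 ≠ comp.getD (nrm n.toNat y) 0 from
        fun h => hxy (hkey.mpr h))]
    exact coupled_merge (coupled_update_eq hc2 hrepy) hxy hrepx hrepy

theorem queryOK_shape {n : Int} {q : List Int} (h : pvQueryOK n q = true) :
    ∃ s t, q = [s, t] ∧ (s = t ∨ (-n ≤ s ∧ s < n ∧ -n ≤ t ∧ t < n)) := by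
  unfold pvQueryOK at h
  split at h
  · rename_i s t
    simp only [decide_eq_true_eq] at h
    exact ⟨s, t, rfl, h⟩
  · cases h

theorem queries_eq {n : Int} : ∀ (query : List (List Int)) {fa and_ comp : List Int}
    {cand : PySem.Dict Int Int},
    query.all (pvQueryOK n) = true → Coupled n fa and_ comp cand →
    pvQueryA fa and_ query = query.map (fun q =>
      match q with
      | [s, t] =>
        if s = t then 0
        else if PySem.List.pyGetD comp s 0 ≠ PySem.List.pyGetD comp t 0 then -1
        else cand.getD (PySem.List.pyGetD comp s 0) (-1)
      | _ => 0) := by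
  intro query
  induction query with
  | nil => intro fa and_ comp cand _ _; rfl
  | cons q rest ih =>
    intro fa and_ comp cand hall hc
    rw [List.all_cons, Bool.and_eq_true] at hall
    obtain ⟨s, t, rfl, hst⟩ := queryOK_shape hall.1
    rcases eq_or_ne s t with rfl | hne
    · simp only [pvQueryA, List.map_cons, if_true]
      rw [ih hall.2 hc]
    · obtain hst | ⟨hs0, hs1, ht0, ht1⟩ := hst
      · exact absurd hst hne
      have hn : 0 < n := by omega
      obtain ⟨hlf, hla, hlc, hu, hpart, hval⟩ := hc
      -- find(s)
      have hsb0 : -(fa.length : Int) ≤ s := by rw [hlf]; omega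
      have hsb1 : s < (fa.length : Int) := by rw [hlf]; omega
      obtain ⟨rs, ds, hrs, hbs⟩ := hu.2 (nrm fa.length s) (nrm_lt hsb0 hsb1)
      have hrc1 : 1 ≤ rcF fa := rcF_pos (reach_root hrs) (reach_lt hu.1 (nrm_lt hsb0 hsb1) hrs)
      obtain ⟨fa1, heq1, hsim1, hg1⟩ :=
        find_spec_int (fuel := fa.length + 1) hu.1 hsb0 hsb1 hrs (by omega)
      have hc1 : Coupled n fa1 and_ comp cand :=
        simF_coupled ⟨hlf, hla, hlc, hu, hpart, hval⟩ hsim1 hg1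
      obtain ⟨hlf1, hla1, hlc1, hu1, hpart1, hval1⟩ := hc1
      -- find(t)
      have htb0 : -(fa1.length : Int) ≤ t := by rw [hlf1]; omega
      have htb1 : t < (fa1.length : Int) := by rw [hlf1]; omega
      obtain ⟨rt, dt, hrt, hbt⟩ := hu1.2 (nrm fa1.length t) (nrm_lt htb0 htb1)
      have hrc2 : 1 ≤ rcF fa1 := rcF_pos (reach_root hrt) (reach_lt hu1.1 (nrm_lt htb0 htb1) hrt)
      obtain ⟨fa2, heq2, hsim2, hg2⟩ :=
        find_spec_int (fuel := fa1.length + 1) hu1.1 htb0 htb1 hrt (by omega)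
      have hc2 : Coupled n fa2 and_ comp cand :=
        simF_coupled ⟨hlf1, hla1, hlc1, hu1, hpart1, hval1⟩ hsim2 hg2
      obtain ⟨hlf2, hla2, hlc2, hu2, hpart2, hval2⟩ := hc2
      -- chains inside fa2
      obtain ⟨es2, _, hrs2⟩ := (simF_trans hsim1 hsim2).2.2 _ rs ds hrs
      obtain ⟨et2, _, hrt2⟩ := hsim2.2.2 _ rt dt hrt
      have hslt : nrm fa.length s < n.toNat := by rw [← hlf]; exact nrm_lt hsb0 hsb1
      have htlt : nrm fa1.length t < n.toNat := by rw [← hlf1]; exact nrm_lt htb0 htb1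
      have hcomps : PySem.List.pyGetD comp s 0 = comp.getD (nrm fa.length s) 0 := by
        rw [pyGetD_nrm _ (by rw [hlc]; omega) (by rw [hlc]; omega), hlc, hlf]
      have hcompt : PySem.List.pyGetD comp t 0 = comp.getD (nrm fa1.length t) 0 := by
        rw [pyGetD_nrm _ (by rw [hlc]; omega) (by rw [hlc]; omega), hlc, hlf1]
      have hkey : rs = rt ↔ comp.getD (nrm fa.length s) 0 = comp.getD (nrm fa1.length t) 0 :=
        hpart2 _ _ rs rt es2 et2 hslt htlt hrs2 hrt2
      -- reduce A's head
      simp only [pvQueryA, List.map_cons, if_neg hne, heq1]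
      rw [heq2]
      dsimp only
      rw [hcomps, hcompt]
      by_cases hrr : rs = rt
      · rw [if_neg (show ¬((rs : Int) ≠ (rt : Int)) from fun h => h (by exact_mod_cast hrr)),
          if_neg (show ¬(comp.getD (nrm fa.length s) 0 ≠ comp.getD (nrm fa1.length t) 0) from
            fun h => h (hkey.mp hrr))]
        -- third find(s) on fa2
        obtain ⟨rs3, ds3, hrs3, hbs3⟩ := hu2.2 (nrm fa2.length s) (by
          have := nrm_lt (len := fa2.length) (i := s) (by rw [hlf2]; omega) (by rw [hlf2]; omega)
          exact this)
        have hrc3 : 1 ≤ rcF fa2 := rcF_pos (reach_root hrs3)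
          (reach_lt hu2.1 (nrm_lt (by rw [hlf2]; omega) (by rw [hlf2]; omega)) hrs3)
        obtain ⟨fa3, heq3, hsim3, hg3⟩ :=
          find_spec_int (fuel := fa2.length + 1) hu2.1 (by rw [hlf2]; omega)
            (by rw [hlf2]; omega) hrs3 (by omega)
        -- the third find returns rs again
        have hnrm22 : nrm fa2.length s = nrm fa.length s := by rw [hlf2, hlf]
        have hrs3' : rs3 = rs := by
          rw [hnrm22] at hrs3
          exact (reach_det hrs3 hrs2).1
        rw [heq3]
        dsimp only
        have hc3 : Coupled n fa3 and_ comp cand :=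
          simF_coupled ⟨hlf2, hla2, hlc2, hu2, hpart2, hval2⟩ hsim3 hg3
      -- head values agree
        rw [hrs3', PySem.List.pyGetD_natCast]
        rw [hval2 _ rs es2 hslt hrs2]
        rw [ih hall.2 hc3]
      · rw [if_pos (show (rs : Int) ≠ (rt : Int) from fun h => hrr (by exact_mod_cast h)),
          if_pos (show comp.getD (nrm fa.length s) 0 ≠ comp.getD (nrm fa1.length t) 0 from
            fun h => hrr (hkey.mpr h))]
        rw [ih hall.2 ⟨hlf2, hla2, hlc2, hu2, hpart2, hval2⟩]

theorem foldl_coupled {n : Int} {edges : List (List Int)} :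
    ∀ {fa and_ comp : List Int} {cand : PySem.Dict Int Int},
    edges.all (pvEdgeOK n) = true → Coupled n fa and_ comp cand →
    Coupled n (edges.foldl pvStepA (fa, and_)).1 (edges.foldl pvStepA (fa, and_)).2
      (edges.foldl pvStepB (comp, cand)).1 (edges.foldl pvStepB (comp, cand)).2 := by
  induction edges with
  | nil => intro fa and_ comp cand _ hc; exact hc
  | cons e rest ih =>
    intro fa and_ comp cand hall hc
    rw [List.all_cons, Bool.and_eq_true] at hall
    have hstep := stepAB_coupled hall.1 hc
    simp only [List.foldl_cons]
    have h1 : pvStepA (fa, and_) e = ((pvStepA (fa, and_) e).1, (pvStepA (fa, and_) e).2) := rfl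
    have h2 : pvStepB (comp, cand) e
        = ((pvStepB (comp, cand) e).1, (pvStepB (comp, cand) e).2) := rfl
    rw [h1, h2]
    exact ih hall.2 hstep

theorem getD_pyRange {n : Int} {i : Nat} (hi : i < n.toNat) :
    (PySem.List.pyRange 0 n 1).getD i 0 = (i : Int) := by
  have hlen : (PySem.List.pyRange 0 n 1).length = n.toNat := by
    rw [PySem.List.length_pyRange_one]
    norm_num
  rw [List.getD_eq_getElem _ _ (by rw [hlen]; exact hi)]
  rw [PySem.List.getElem_pyRange_one]
  norm_num

theorem init_coupled (n : Int) :
    Coupled n (PySem.List.pyRange 0 n 1) (List.replicate n.toNat (-1 : Int))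
      (PySem.List.pyRange 0 n 1) PySem.Dict.empty := by
  have hlen : (PySem.List.pyRange 0 n 1).length = n.toNat := by
    rw [PySem.List.length_pyRange_one]; norm_num
  have hpar : ∀ i, i < n.toNat → parF (PySem.List.pyRange 0 n 1) i = i := by
    intro i hi
    unfold parF
    rw [getD_pyRange hi]
    exact Int.toNat_natCast i
  have hdet : ∀ i ri di, i < n.toNat → ReachD (PySem.List.pyRange 0 n 1) i ri di → ri = i := by
    intro i ri di hi h
    exact (reach_det h (ReachD.root i (hpar i hi))).1
  have hrc : rcF (PySem.List.pyRange 0 n 1) = n.toNat := by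
    unfold rcF
    rw [hlen]
    rw [List.countP_eq_length.mpr (fun a ha => by
      simp only [decide_eq_true_eq]
      exact hpar a (List.mem_range.mp ha))]
    exact List.length_range
  refine ⟨hlen, List.length_replicate, hlen, ⟨?_, ?_⟩, ?_, ?_⟩
  · intro i hi
    rw [hlen] at hi
    rw [getD_pyRange hi, hlen]
    exact ⟨by positivity, by simpa using hi⟩
  · intro i hi
    rw [hlen] at hi
    exact ⟨i, 0, ReachD.root i (hpar i hi), by rw [hrc, hlen]; omega⟩
  · intro i j ri rj di dj hi hj hri hrj
    rw [hdet i ri di hi hri, hdet j rj dj hj hrj, getD_pyRange hi, getD_pyRange hj]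
    constructor
    · intro h; exact_mod_cast h
    · intro h; exact_mod_cast h
  · intro i ri di hi hri
    rw [hdet i ri di hi hri]
    rw [List.getD_eq_getElem _ _ (by rw [List.length_replicate]; exact hi),
      List.getElem_replicate, PySem.Dict.getD_empty]

-- ===== VERDICT (by name: the statement is the Claim_ definition above) =====
theorem minimumCost1_spec : Claim_equal_minimumCost1 := by
  intro n edges query _hdom hpre
  obtain ⟨hedges, hquery⟩ := hpre
  unfold Spec_minimumCost1 minimumCost1 minimumCost1_alt
  have h := foldl_coupled (n := n) (edges := edges) hedges (init_coupled n)
  exact queries_eq query hquery h
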